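-- pv_equiv track=rewrite | github.com/destor01/2048_py | 2048.py | movarriba
-- ===== SOURCE A (Python) =====
-- def movarriba(M):
--   aux = M
--   x=0
--   while x <= 2:
--     if x == 0:
--       for c in range(0,4):
--         if aux[x][c] == " ":
--           if M[x+1][c] != " ":
--             M[x][c]=M[x+1][c]
--             M[x+1][c] = " "
--           elif M[x+2][c] != " ":
--             M[x][c]=M[x+2][c]
--             M[x+2][c] = " "
--           elif M[x+3][c] != " ":
--             M[x][c]=M[x+3][c]
--             M[x+3][c] = " "
--     elif x == 1:
--       for c in range(0,4):
--         if aux[x][c] == " ":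
--           if M[x+1][c] != " ":
--             M[x][c]=M[x+1][c]
--             M[x+1][c] = " "
--           elif M[x+2][c] != " ":
--             M[x][c]=M[x+2][c]
--             M[x+2][c] = " "
--     elif x == 2:
--       for c in range(0,4):
--         if aux[x][c] == " ":
--           if M[x+1][c] != " ":
--             M[x][c]=M[x+1][c]
--             M[x+1][c] = " "
--     x = x + 1
--   return aux
-- ===== SOURCE B (Python) =====
-- def movarriba(M):
--   # gather-then-refill per column; mutates M in place and returns it, like A
--   for c in range(4):
--     tiles = [M[r][c] for r in range(4) if M[r][c] != " "]
--     for r in range(4):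
--       M[r][c] = tiles[r] if r < len(tiles) else " "
--   return M
-- ===== Notes on version B (the rewrite author's own statement) =====
-- stated objective: simpler
-- what changed: Replaces A's three sequential row passes with a per-row conditional 'pull the nearest non-blank tile from below' ladder by a single gather-then-refill pass per column: collect the column's non-blank entries in order, then rewrite the column top-down padding with blanks.
import Mathlib
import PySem

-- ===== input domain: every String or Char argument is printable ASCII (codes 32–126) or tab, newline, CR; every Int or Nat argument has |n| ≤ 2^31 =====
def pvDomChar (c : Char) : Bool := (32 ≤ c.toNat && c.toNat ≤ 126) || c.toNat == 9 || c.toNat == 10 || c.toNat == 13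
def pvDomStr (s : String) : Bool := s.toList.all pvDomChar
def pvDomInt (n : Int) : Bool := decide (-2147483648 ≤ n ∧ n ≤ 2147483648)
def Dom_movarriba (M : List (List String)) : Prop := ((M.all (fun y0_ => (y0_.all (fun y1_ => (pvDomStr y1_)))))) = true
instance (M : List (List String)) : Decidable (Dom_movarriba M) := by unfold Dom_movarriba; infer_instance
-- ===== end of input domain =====

-- ===== PORT A =====
-- B replaces A's three conditional 'pull the nearest tile from below' row passes by a
-- per-column gather-then-refill compaction (objective: simpler).  In Python both mutate
-- M in place and return the same object; the equivalence proved is about the returned grid.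
-- cell read M[r][c]; under Pre_ every index A/B uses is in range, so getD is exact here
def pvCell (M : List (List String)) (r c : Nat) : String := (M.getD r []).getD c ""
-- cell write M[r][c] = v
def pvPut (M : List (List String)) (r c : Nat) (v : String) : List (List String) :=
  M.set r ((M.getD r []).set c v)

-- the x = 0 iteration of A's while loop (the body of its 'for c in range(0,4)')
def pass0step (M : List (List String)) (c : Nat) : List (List String) :=
  if pvCell M 0 c = " " then
    if pvCell M 1 c ≠ " " then pvPut (pvPut M 0 c (pvCell M 1 c)) 1 c " "
    else if pvCell M 2 c ≠ " " then pvPut (pvPut M 0 c (pvCell M 2 c)) 2 c " "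
    else if pvCell M 3 c ≠ " " then pvPut (pvPut M 0 c (pvCell M 3 c)) 3 c " "
    else M
  else M

-- the x = 1 iteration
def pass1step (M : List (List String)) (c : Nat) : List (List String) :=
  if pvCell M 1 c = " " then
    if pvCell M 2 c ≠ " " then pvPut (pvPut M 1 c (pvCell M 2 c)) 2 c " "
    else if pvCell M 3 c ≠ " " then pvPut (pvPut M 1 c (pvCell M 3 c)) 3 c " "
    else M
  else M

-- the x = 2 iteration
def pass2step (M : List (List String)) (c : Nat) : List (List String) :=
  if pvCell M 2 c = " " then
    if pvCell M 3 c ≠ " " then pvPut (pvPut M 2 c (pvCell M 3 c)) 3 c " "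
    else M
  else M

-- 'while x <= 2' unrolled to its three iterations, each a 'for c in range(0,4)'
def movarriba (M : List (List String)) : List (List String) :=
  (List.range 4).foldl pass2step
    ((List.range 4).foldl pass1step
      ((List.range 4).foldl pass0step M))

-- ===== PORT B =====
-- one column of B: tiles = [M[r][c] for r in range(4) if M[r][c] != " "], then refill top-down
def colStep (M : List (List String)) (c : Nat) : List (List String) :=
  let tiles := ((List.range 4).filter (fun r => pvCell M r c ≠ " ")).map (fun r => pvCell M r c)
  (List.range 4).foldl (fun N r => pvPut N r c (tiles.getD r " ")) M

def movarriba_alt (M : List (List String)) : List (List String) :=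
  (List.range 4).foldl colStep M

-- ===== PRECONDITION & SPEC =====
-- Pre_ excludes grids without a full 4x4 upper-left block: there the Python A raises
-- IndexError, except for degenerate grids whose short cells A's conditionals happen never
-- to reach (A returns the grid unchanged, B raises); see claim.json "cites".
def Pre_movarriba (M : List (List String)) : Prop :=
  4 ≤ M.length ∧ 4 ≤ (M.getD 0 []).length ∧ 4 ≤ (M.getD 1 []).length ∧
    4 ≤ (M.getD 2 []).length ∧ 4 ≤ (M.getD 3 []).length
instance (M : List (List String)) : Decidable (Pre_movarriba M) := by
  unfold Pre_movarriba; infer_instance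
def pvWitness_movarriba : List (List String) :=
  [[" ", "2", " ", "4"], ["2", " ", " ", " "], [" ", " ", "8", " "], ["4", "2", " ", "16"]]

def Spec_movarriba (M : List (List String)) (out : List (List String)) : Prop := out = movarriba_alt M
instance (M : List (List String)) (out : List (List String)) : Decidable (Spec_movarriba M out) := by unfold Spec_movarriba; infer_instance

-- ===== CLAIM (what is proved, stated in full; the proofs are below) =====
def Claim_equal_movarriba : Prop := ∀ (M : List (List String)), Dom_movarriba M → Pre_movarriba M → Spec_movarriba M (movarriba M)

-- ===== LEMMAS AND PROOFS =====
-- what one pass of A does to one column (a b c d = the column, top to bottom)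
def up0 (a b c d : String) : List String :=
  if a = " " then
    if b ≠ " " then [b, " ", c, d]
    else if c ≠ " " then [c, b, " ", d]
    else if d ≠ " " then [d, b, c, " "]
    else [a, b, c, d]
  else [a, b, c, d]
def up1 (a b c d : String) : List String :=
  if b = " " then
    if c ≠ " " then [a, c, " ", d]
    else if d ≠ " " then [a, d, c, " "]
    else [a, b, c, d]
  else [a, b, c, d]
def up2 (a b c d : String) : List String :=
  if c = " " then
    if d ≠ " " then [a, b, d, " "]
    else [a, b, c, d]
  else [a, b, c, d]
-- B's column result before padding
def compact4 (a b c d : String) : List String := [a, b, c, d].filter (fun s => s ≠ " ")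

theorem cons4 {α : Type} (l : List α) (h : 4 ≤ l.length) :
    ∃ a b c d t, l = a :: b :: c :: d :: t := by
  rcases l with _ | ⟨a, _ | ⟨b, _ | ⟨c, _ | ⟨d, t⟩⟩⟩⟩ <;>
    simp only [List.length_nil, List.length_cons] at h <;>
    first
      | exact ⟨a, b, c, d, t, rfl⟩
      | omega

theorem p0_0 (a00 a01 a02 a03 a10 a11 a12 a13 a20 a21 a22 a23 a30 a31 a32 a33 : String)
    (t0 t1 t2 t3 : List String) (tm : List (List String)) :
    pass0step ((a00 :: a01 :: a02 :: a03 :: t0) :: (a10 :: a11 :: a12 :: a13 :: t1) :: (a20 :: a21 :: a22 :: a23 :: t2) :: (a30 :: a31 :: a32 :: a33 :: t3) :: tm) 0 = (((up0 a00 a10 a20 a30).getD 0 " ") :: a01 :: a02 :: a03 :: t0) :: (((up0 a00 a10 a20 a30).getD 1 " ") :: a11 :: a12 :: a13 :: t1) :: (((up0 a00 a10 a20 a30).getD 2 " ") :: a21 :: a22 :: a23 :: t2) :: (((up0 a00 a10 a20 a30).getD 3 " ") :: a31 :: a32 :: a33 :: t3) :: tm := by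
  simp only [pass0step, up0, pvCell, pvPut, List.getD_cons_zero, List.getD_cons_succ,
    List.set]
  split_ifs <;> simp_all

theorem p0_1 (a00 a01 a02 a03 a10 a11 a12 a13 a20 a21 a22 a23 a30 a31 a32 a33 : String)
    (t0 t1 t2 t3 : List String) (tm : List (List String)) :
    pass0step ((a00 :: a01 :: a02 :: a03 :: t0) :: (a10 :: a11 :: a12 :: a13 :: t1) :: (a20 :: a21 :: a22 :: a23 :: t2) :: (a30 :: a31 :: a32 :: a33 :: t3) :: tm) 1 = (a00 :: ((up0 a01 a11 a21 a31).getD 0 " ") :: a02 :: a03 :: t0) :: (a10 :: ((up0 a01 a11 a21 a31).getD 1 " ") :: a12 :: a13 :: t1) :: (a20 :: ((up0 a01 a11 a21 a31).getD 2 " ") :: a22 :: a23 :: t2) :: (a30 :: ((up0 a01 a11 a21 a31).getD 3 " ") :: a32 :: a33 :: t3) :: tm := by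
  simp only [pass0step, up0, pvCell, pvPut, List.getD_cons_zero, List.getD_cons_succ,
    List.set]
  split_ifs <;> simp_all

theorem p0_2 (a00 a01 a02 a03 a10 a11 a12 a13 a20 a21 a22 a23 a30 a31 a32 a33 : String)
    (t0 t1 t2 t3 : List String) (tm : List (List String)) :
    pass0step ((a00 :: a01 :: a02 :: a03 :: t0) :: (a10 :: a11 :: a12 :: a13 :: t1) :: (a20 :: a21 :: a22 :: a23 :: t2) :: (a30 :: a31 :: a32 :: a33 :: t3) :: tm) 2 = (a00 :: a01 :: ((up0 a02 a12 a22 a32).getD 0 " ") :: a03 :: t0) :: (a10 :: a11 :: ((up0 a02 a12 a22 a32).getD 1 " ") :: a13 :: t1) :: (a20 :: a21 :: ((up0 a02 a12 a22 a32).getD 2 " ") :: a23 :: t2) :: (a30 :: a31 :: ((up0 a02 a12 a22 a32).getD 3 " ") :: a33 :: t3) :: tm := by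
  simp only [pass0step, up0, pvCell, pvPut, List.getD_cons_zero, List.getD_cons_succ,
    List.set]
  split_ifs <;> simp_all

theorem p0_3 (a00 a01 a02 a03 a10 a11 a12 a13 a20 a21 a22 a23 a30 a31 a32 a33 : String)
    (t0 t1 t2 t3 : List String) (tm : List (List String)) :
    pass0step ((a00 :: a01 :: a02 :: a03 :: t0) :: (a10 :: a11 :: a12 :: a13 :: t1) :: (a20 :: a21 :: a22 :: a23 :: t2) :: (a30 :: a31 :: a32 :: a33 :: t3) :: tm) 3 = (a00 :: a01 :: a02 :: ((up0 a03 a13 a23 a33).getD 0 " ") :: t0) :: (a10 :: a11 :: a12 :: ((up0 a03 a13 a23 a33).getD 1 " ") :: t1) :: (a20 :: a21 :: a22 :: ((up0 a03 a13 a23 a33).getD 2 " ") :: t2) :: (a30 :: a31 :: a32 :: ((up0 a03 a13 a23 a33).getD 3 " ") :: t3) :: tm := by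
  simp only [pass0step, up0, pvCell, pvPut, List.getD_cons_zero, List.getD_cons_succ,
    List.set]
  split_ifs <;> simp_all

theorem p1_0 (a00 a01 a02 a03 a10 a11 a12 a13 a20 a21 a22 a23 a30 a31 a32 a33 : String)
    (t0 t1 t2 t3 : List String) (tm : List (List String)) :
    pass1step ((a00 :: a01 :: a02 :: a03 :: t0) :: (a10 :: a11 :: a12 :: a13 :: t1) :: (a20 :: a21 :: a22 :: a23 :: t2) :: (a30 :: a31 :: a32 :: a33 :: t3) :: tm) 0 = (((up1 a00 a10 a20 a30).getD 0 " ") :: a01 :: a02 :: a03 :: t0) :: (((up1 a00 a10 a20 a30).getD 1 " ") :: a11 :: a12 :: a13 :: t1) :: (((up1 a00 a10 a20 a30).getD 2 " ") :: a21 :: a22 :: a23 :: t2) :: (((up1 a00 a10 a20 a30).getD 3 " ") :: a31 :: a32 :: a33 :: t3) :: tm := by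
  simp only [pass1step, up1, pvCell, pvPut, List.getD_cons_zero, List.getD_cons_succ,
    List.set]
  split_ifs <;> simp_all

theorem p1_1 (a00 a01 a02 a03 a10 a11 a12 a13 a20 a21 a22 a23 a30 a31 a32 a33 : String)
    (t0 t1 t2 t3 : List String) (tm : List (List String)) :
    pass1step ((a00 :: a01 :: a02 :: a03 :: t0) :: (a10 :: a11 :: a12 :: a13 :: t1) :: (a20 :: a21 :: a22 :: a23 :: t2) :: (a30 :: a31 :: a32 :: a33 :: t3) :: tm) 1 = (a00 :: ((up1 a01 a11 a21 a31).getD 0 " ") :: a02 :: a03 :: t0) :: (a10 :: ((up1 a01 a11 a21 a31).getD 1 " ") :: a12 :: a13 :: t1) :: (a20 :: ((up1 a01 a11 a21 a31).getD 2 " ") :: a22 :: a23 :: t2) :: (a30 :: ((up1 a01 a11 a21 a31).getD 3 " ") :: a32 :: a33 :: t3) :: tm := by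
  simp only [pass1step, up1, pvCell, pvPut, List.getD_cons_zero, List.getD_cons_succ,
    List.set]
  split_ifs <;> simp_all

theorem p1_2 (a00 a01 a02 a03 a10 a11 a12 a13 a20 a21 a22 a23 a30 a31 a32 a33 : String)
    (t0 t1 t2 t3 : List String) (tm : List (List String)) :
    pass1step ((a00 :: a01 :: a02 :: a03 :: t0) :: (a10 :: a11 :: a12 :: a13 :: t1) :: (a20 :: a21 :: a22 :: a23 :: t2) :: (a30 :: a31 :: a32 :: a33 :: t3) :: tm) 2 = (a00 :: a01 :: ((up1 a02 a12 a22 a32).getD 0 " ") :: a03 :: t0) :: (a10 :: a11 :: ((up1 a02 a12 a22 a32).getD 1 " ") :: a13 :: t1) :: (a20 :: a21 :: ((up1 a02 a12 a22 a32).getD 2 " ") :: a23 :: t2) :: (a30 :: a31 :: ((up1 a02 a12 a22 a32).getD 3 " ") :: a33 :: t3) :: tm := by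
  simp only [pass1step, up1, pvCell, pvPut, List.getD_cons_zero, List.getD_cons_succ,
    List.set]
  split_ifs <;> simp_all

theorem p1_3 (a00 a01 a02 a03 a10 a11 a12 a13 a20 a21 a22 a23 a30 a31 a32 a33 : String)
    (t0 t1 t2 t3 : List String) (tm : List (List String)) :
    pass1step ((a00 :: a01 :: a02 :: a03 :: t0) :: (a10 :: a11 :: a12 :: a13 :: t1) :: (a20 :: a21 :: a22 :: a23 :: t2) :: (a30 :: a31 :: a32 :: a33 :: t3) :: tm) 3 = (a00 :: a01 :: a02 :: ((up1 a03 a13 a23 a33).getD 0 " ") :: t0) :: (a10 :: a11 :: a12 :: ((up1 a03 a13 a23 a33).getD 1 " ") :: t1) :: (a20 :: a21 :: a22 :: ((up1 a03 a13 a23 a33).getD 2 " ") :: t2) :: (a30 :: a31 :: a32 :: ((up1 a03 a13 a23 a33).getD 3 " ") :: t3) :: tm := by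
  simp only [pass1step, up1, pvCell, pvPut, List.getD_cons_zero, List.getD_cons_succ,
    List.set]
  split_ifs <;> simp_all

theorem p2_0 (a00 a01 a02 a03 a10 a11 a12 a13 a20 a21 a22 a23 a30 a31 a32 a33 : String)
    (t0 t1 t2 t3 : List String) (tm : List (List String)) :
    pass2step ((a00 :: a01 :: a02 :: a03 :: t0) :: (a10 :: a11 :: a12 :: a13 :: t1) :: (a20 :: a21 :: a22 :: a23 :: t2) :: (a30 :: a31 :: a32 :: a33 :: t3) :: tm) 0 = (((up2 a00 a10 a20 a30).getD 0 " ") :: a01 :: a02 :: a03 :: t0) :: (((up2 a00 a10 a20 a30).getD 1 " ") :: a11 :: a12 :: a13 :: t1) :: (((up2 a00 a10 a20 a30).getD 2 " ") :: a21 :: a22 :: a23 :: t2) :: (((up2 a00 a10 a20 a30).getD 3 " ") :: a31 :: a32 :: a33 :: t3) :: tm := by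
  simp only [pass2step, up2, pvCell, pvPut, List.getD_cons_zero, List.getD_cons_succ,
    List.set]
  split_ifs <;> simp_all

theorem p2_1 (a00 a01 a02 a03 a10 a11 a12 a13 a20 a21 a22 a23 a30 a31 a32 a33 : String)
    (t0 t1 t2 t3 : List String) (tm : List (List String)) :
    pass2step ((a00 :: a01 :: a02 :: a03 :: t0) :: (a10 :: a11 :: a12 :: a13 :: t1) :: (a20 :: a21 :: a22 :: a23 :: t2) :: (a30 :: a31 :: a32 :: a33 :: t3) :: tm) 1 = (a00 :: ((up2 a01 a11 a21 a31).getD 0 " ") :: a02 :: a03 :: t0) :: (a10 :: ((up2 a01 a11 a21 a31).getD 1 " ") :: a12 :: a13 :: t1) :: (a20 :: ((up2 a01 a11 a21 a31).getD 2 " ") :: a22 :: a23 :: t2) :: (a30 :: ((up2 a01 a11 a21 a31).getD 3 " ") :: a32 :: a33 :: t3) :: tm := by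
  simp only [pass2step, up2, pvCell, pvPut, List.getD_cons_zero, List.getD_cons_succ,
    List.set]
  split_ifs <;> simp_all

theorem p2_2 (a00 a01 a02 a03 a10 a11 a12 a13 a20 a21 a22 a23 a30 a31 a32 a33 : String)
    (t0 t1 t2 t3 : List String) (tm : List (List String)) :
    pass2step ((a00 :: a01 :: a02 :: a03 :: t0) :: (a10 :: a11 :: a12 :: a13 :: t1) :: (a20 :: a21 :: a22 :: a23 :: t2) :: (a30 :: a31 :: a32 :: a33 :: t3) :: tm) 2 = (a00 :: a01 :: ((up2 a02 a12 a22 a32).getD 0 " ") :: a03 :: t0) :: (a10 :: a11 :: ((up2 a02 a12 a22 a32).getD 1 " ") :: a13 :: t1) :: (a20 :: a21 :: ((up2 a02 a12 a22 a32).getD 2 " ") :: a23 :: t2) :: (a30 :: a31 :: ((up2 a02 a12 a22 a32).getD 3 " ") :: a33 :: t3) :: tm := by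
  simp only [pass2step, up2, pvCell, pvPut, List.getD_cons_zero, List.getD_cons_succ,
    List.set]
  split_ifs <;> simp_all

theorem p2_3 (a00 a01 a02 a03 a10 a11 a12 a13 a20 a21 a22 a23 a30 a31 a32 a33 : String)
    (t0 t1 t2 t3 : List String) (tm : List (List String)) :
    pass2step ((a00 :: a01 :: a02 :: a03 :: t0) :: (a10 :: a11 :: a12 :: a13 :: t1) :: (a20 :: a21 :: a22 :: a23 :: t2) :: (a30 :: a31 :: a32 :: a33 :: t3) :: tm) 3 = (a00 :: a01 :: a02 :: ((up2 a03 a13 a23 a33).getD 0 " ") :: t0) :: (a10 :: a11 :: a12 :: ((up2 a03 a13 a23 a33).getD 1 " ") :: t1) :: (a20 :: a21 :: a22 :: ((up2 a03 a13 a23 a33).getD 2 " ") :: t2) :: (a30 :: a31 :: a32 :: ((up2 a03 a13 a23 a33).getD 3 " ") :: t3) :: tm := by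
  simp only [pass2step, up2, pvCell, pvPut, List.getD_cons_zero, List.getD_cons_succ,
    List.set]
  split_ifs <;> simp_all

theorem cs_0 (a00 a01 a02 a03 a10 a11 a12 a13 a20 a21 a22 a23 a30 a31 a32 a33 : String)
    (t0 t1 t2 t3 : List String) (tm : List (List String)) :
    colStep ((a00 :: a01 :: a02 :: a03 :: t0) :: (a10 :: a11 :: a12 :: a13 :: t1) :: (a20 :: a21 :: a22 :: a23 :: t2) :: (a30 :: a31 :: a32 :: a33 :: t3) :: tm) 0 = (((compact4 a00 a10 a20 a30).getD 0 " ") :: a01 :: a02 :: a03 :: t0) :: (((compact4 a00 a10 a20 a30).getD 1 " ") :: a11 :: a12 :: a13 :: t1) :: (((compact4 a00 a10 a20 a30).getD 2 " ") :: a21 :: a22 :: a23 :: t2) :: (((compact4 a00 a10 a20 a30).getD 3 " ") :: a31 :: a32 :: a33 :: t3) :: tm := by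
  simp only [colStep, compact4, pvCell, pvPut, List.range_succ, List.filter_cons,
    List.filter_nil, List.nil_append, List.cons_append, List.foldl_cons, List.foldl_nil]
  split_ifs <;> simp_all

theorem cs_1 (a00 a01 a02 a03 a10 a11 a12 a13 a20 a21 a22 a23 a30 a31 a32 a33 : String)
    (t0 t1 t2 t3 : List String) (tm : List (List String)) :
    colStep ((a00 :: a01 :: a02 :: a03 :: t0) :: (a10 :: a11 :: a12 :: a13 :: t1) :: (a20 :: a21 :: a22 :: a23 :: t2) :: (a30 :: a31 :: a32 :: a33 :: t3) :: tm) 1 = (a00 :: ((compact4 a01 a11 a21 a31).getD 0 " ") :: a02 :: a03 :: t0) :: (a10 :: ((compact4 a01 a11 a21 a31).getD 1 " ") :: a12 :: a13 :: t1) :: (a20 :: ((compact4 a01 a11 a21 a31).getD 2 " ") :: a22 :: a23 :: t2) :: (a30 :: ((compact4 a01 a11 a21 a31).getD 3 " ") :: a32 :: a33 :: t3) :: tm := by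
  simp only [colStep, compact4, pvCell, pvPut, List.range_succ, List.filter_cons,
    List.filter_nil, List.nil_append, List.cons_append, List.foldl_cons, List.foldl_nil]
  split_ifs <;> simp_all

theorem cs_2 (a00 a01 a02 a03 a10 a11 a12 a13 a20 a21 a22 a23 a30 a31 a32 a33 : String)
    (t0 t1 t2 t3 : List String) (tm : List (List String)) :
    colStep ((a00 :: a01 :: a02 :: a03 :: t0) :: (a10 :: a11 :: a12 :: a13 :: t1) :: (a20 :: a21 :: a22 :: a23 :: t2) :: (a30 :: a31 :: a32 :: a33 :: t3) :: tm) 2 = (a00 :: a01 :: ((compact4 a02 a12 a22 a32).getD 0 " ") :: a03 :: t0) :: (a10 :: a11 :: ((compact4 a02 a12 a22 a32).getD 1 " ") :: a13 :: t1) :: (a20 :: a21 :: ((compact4 a02 a12 a22 a32).getD 2 " ") :: a23 :: t2) :: (a30 :: a31 :: ((compact4 a02 a12 a22 a32).getD 3 " ") :: a33 :: t3) :: tm := by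
  simp only [colStep, compact4, pvCell, pvPut, List.range_succ, List.filter_cons,
    List.filter_nil, List.nil_append, List.cons_append, List.foldl_cons, List.foldl_nil]
  split_ifs <;> simp_all

theorem cs_3 (a00 a01 a02 a03 a10 a11 a12 a13 a20 a21 a22 a23 a30 a31 a32 a33 : String)
    (t0 t1 t2 t3 : List String) (tm : List (List String)) :
    colStep ((a00 :: a01 :: a02 :: a03 :: t0) :: (a10 :: a11 :: a12 :: a13 :: t1) :: (a20 :: a21 :: a22 :: a23 :: t2) :: (a30 :: a31 :: a32 :: a33 :: t3) :: tm) 3 = (a00 :: a01 :: a02 :: ((compact4 a03 a13 a23 a33).getD 0 " ") :: t0) :: (a10 :: a11 :: a12 :: ((compact4 a03 a13 a23 a33).getD 1 " ") :: t1) :: (a20 :: a21 :: a22 :: ((compact4 a03 a13 a23 a33).getD 2 " ") :: t2) :: (a30 :: a31 :: a32 :: ((compact4 a03 a13 a23 a33).getD 3 " ") :: t3) :: tm := by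
  simp only [colStep, compact4, pvCell, pvPut, List.range_succ, List.filter_cons,
    List.filter_nil, List.nil_append, List.cons_append, List.foldl_cons, List.foldl_nil]
  split_ifs <;> simp_all

theorem chain0 (a b c d : String) :
    ((up2 ((up1 ((up0 a b c d).getD 0 " ") ((up0 a b c d).getD 1 " ") ((up0 a b c d).getD 2 " ") ((up0 a b c d).getD 3 " ")).getD 0 " ") ((up1 ((up0 a b c d).getD 0 " ") ((up0 a b c d).getD 1 " ") ((up0 a b c d).getD 2 " ") ((up0 a b c d).getD 3 " ")).getD 1 " ") ((up1 ((up0 a b c d).getD 0 " ") ((up0 a b c d).getD 1 " ") ((up0 a b c d).getD 2 " ") ((up0 a b c d).getD 3 " ")).getD 2 " ") ((up1 ((up0 a b c d).getD 0 " ") ((up0 a b c d).getD 1 " ") ((up0 a b c d).getD 2 " ") ((up0 a b c d).getD 3 " ")).getD 3 " ")).getD 0 " ") = ((compact4 a b c d).getD 0 " ") := by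
  by_cases h0 : a = " " <;> by_cases h1 : b = " " <;> by_cases h2 : c = " " <;> by_cases h3 : d = " " <;>
    simp [up0, up1, up2, compact4, h0, h1, h2, h3]

theorem chain1 (a b c d : String) :
    ((up2 ((up1 ((up0 a b c d).getD 0 " ") ((up0 a b c d).getD 1 " ") ((up0 a b c d).getD 2 " ") ((up0 a b c d).getD 3 " ")).getD 0 " ") ((up1 ((up0 a b c d).getD 0 " ") ((up0 a b c d).getD 1 " ") ((up0 a b c d).getD 2 " ") ((up0 a b c d).getD 3 " ")).getD 1 " ") ((up1 ((up0 a b c d).getD 0 " ") ((up0 a b c d).getD 1 " ") ((up0 a b c d).getD 2 " ") ((up0 a b c d).getD 3 " ")).getD 2 " ") ((up1 ((up0 a b c d).getD 0 " ") ((up0 a b c d).getD 1 " ") ((up0 a b c d).getD 2 " ") ((up0 a b c d).getD 3 " ")).getD 3 " ")).getD 1 " ") = ((compact4 a b c d).getD 1 " ") := by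
  by_cases h0 : a = " " <;> by_cases h1 : b = " " <;> by_cases h2 : c = " " <;> by_cases h3 : d = " " <;>
    simp [up0, up1, up2, compact4, h0, h1, h2, h3]

theorem chain2 (a b c d : String) :
    ((up2 ((up1 ((up0 a b c d).getD 0 " ") ((up0 a b c d).getD 1 " ") ((up0 a b c d).getD 2 " ") ((up0 a b c d).getD 3 " ")).getD 0 " ") ((up1 ((up0 a b c d).getD 0 " ") ((up0 a b c d).getD 1 " ") ((up0 a b c d).getD 2 " ") ((up0 a b c d).getD 3 " ")).getD 1 " ") ((up1 ((up0 a b c d).getD 0 " ") ((up0 a b c d).getD 1 " ") ((up0 a b c d).getD 2 " ") ((up0 a b c d).getD 3 " ")).getD 2 " ") ((up1 ((up0 a b c d).getD 0 " ") ((up0 a b c d).getD 1 " ") ((up0 a b c d).getD 2 " ") ((up0 a b c d).getD 3 " ")).getD 3 " ")).getD 2 " ") = ((compact4 a b c d).getD 2 " ") := by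
  by_cases h0 : a = " " <;> by_cases h1 : b = " " <;> by_cases h2 : c = " " <;> by_cases h3 : d = " " <;>
    simp [up0, up1, up2, compact4, h0, h1, h2, h3]

theorem chain3 (a b c d : String) :
    ((up2 ((up1 ((up0 a b c d).getD 0 " ") ((up0 a b c d).getD 1 " ") ((up0 a b c d).getD 2 " ") ((up0 a b c d).getD 3 " ")).getD 0 " ") ((up1 ((up0 a b c d).getD 0 " ") ((up0 a b c d).getD 1 " ") ((up0 a b c d).getD 2 " ") ((up0 a b c d).getD 3 " ")).getD 1 " ") ((up1 ((up0 a b c d).getD 0 " ") ((up0 a b c d).getD 1 " ") ((up0 a b c d).getD 2 " ") ((up0 a b c d).getD 3 " ")).getD 2 " ") ((up1 ((up0 a b c d).getD 0 " ") ((up0 a b c d).getD 1 " ") ((up0 a b c d).getD 2 " ") ((up0 a b c d).getD 3 " ")).getD 3 " ")).getD 3 " ") = ((compact4 a b c d).getD 3 " ") := by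
  by_cases h0 : a = " " <;> by_cases h1 : b = " " <;> by_cases h2 : c = " " <;> by_cases h3 : d = " " <;>
    simp [up0, up1, up2, compact4, h0, h1, h2, h3]

set_option maxHeartbeats 1000000 in
theorem movarriba_eq (M : List (List String)) (h : Pre_movarriba M) :
    movarriba M = movarriba_alt M := by
  obtain ⟨h0, h1, h2, h3, h4⟩ := h
  obtain ⟨m0, m1, m2, m3, tm, rfl⟩ := cons4 M h0
  simp only [List.getD_cons_zero, List.getD_cons_succ] at h1 h2 h3 h4
  obtain ⟨a00, a01, a02, a03, t0, rfl⟩ := cons4 m0 h1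
  obtain ⟨a10, a11, a12, a13, t1, rfl⟩ := cons4 m1 h2
  obtain ⟨a20, a21, a22, a23, t2, rfl⟩ := cons4 m2 h3
  obtain ⟨a30, a31, a32, a33, t3, rfl⟩ := cons4 m3 h4
  have hr : List.range 4 = [0, 1, 2, 3] := by decide
  simp only [movarriba, movarriba_alt, hr, List.foldl_cons, List.foldl_nil]
  rw [p0_0, p0_1, p0_2, p0_3, p1_0, p1_1, p1_2, p1_3, p2_0, p2_1, p2_2, p2_3,
    cs_0, cs_1, cs_2, cs_3]
  simp only [chain0, chain1, chain2, chain3]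

-- ===== VERDICT (by name: the statement is the Claim_ definition above) =====
theorem movarriba_spec : Claim_equal_movarriba := by
  intro M _ hPre
  exact movarriba_eq M hPre
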